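-- pv_equiv track=rewrite | github.com/enigmatic-cipher/JPR-7-TASK-8 | main.py | countLower
-- ===== SOURCE A (Python) =====
-- def countLower(st):
--   ln = len(st)
--   if (ln==0):
--     return 0
--
--   count = 0
--   ch = st[0]
--   if (ch>='a' and ch<='z'):
--     count = count + 1
--   return (count + countLower(st[1:]))
-- ===== SOURCE B (Python) =====
-- def countLower(st):
--   count = 0
--   for ch in st:
--     if ch >= 'a' and ch <= 'z':
--       count = count + 1
--   return count
-- ===== Notes on version B (the rewrite author's own statement) =====
-- stated objective: simpler
-- what changed: Replaces A's recursion over string suffixes (st[1:]) with a single iterative for-loop over the characters with an explicit count accumulator.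
import Mathlib
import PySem

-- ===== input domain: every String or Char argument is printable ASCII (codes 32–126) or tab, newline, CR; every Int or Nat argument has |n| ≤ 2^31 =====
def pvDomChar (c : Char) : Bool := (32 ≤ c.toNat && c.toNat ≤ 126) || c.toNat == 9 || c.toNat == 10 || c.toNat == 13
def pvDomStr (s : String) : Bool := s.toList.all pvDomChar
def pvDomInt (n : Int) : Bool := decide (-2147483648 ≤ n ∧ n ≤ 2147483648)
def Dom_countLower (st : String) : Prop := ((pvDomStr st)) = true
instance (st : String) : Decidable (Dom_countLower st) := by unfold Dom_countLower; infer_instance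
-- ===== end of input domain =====

-- B: iterative accumulator loop over the characters instead of A's suffix recursion (same values everywhere).
-- ===== PORT A =====
-- A's recursion over st[0] / st[1:], transcribed as structural recursion on the character list.
def countLowerGo : List Char → Int
  | [] => 0
  | ch :: rest =>
    (if ch ≥ 'a' && ch ≤ 'z' then (1 : Int) else 0) + countLowerGo rest

def countLower (st : String) : Int := countLowerGo st.toList

-- ===== PORT B =====
-- B: for ch in st, increment count when 'a' <= ch <= 'z'.
def countLower_alt (st : String) : Int :=
  st.toList.foldl (fun count ch => if ch ≥ 'a' && ch ≤ 'z' then count + 1 else count) 0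

-- ===== PRECONDITION & SPEC =====
def Spec_countLower (st : String) (out : Int) : Prop := out = countLower_alt st
instance (st : String) (out : Int) : Decidable (Spec_countLower st out) := by unfold Spec_countLower; infer_instance

-- ===== CLAIM (what is proved, stated in full; the proofs are below) =====
def Claim_equal_countLower : Prop := ∀ (st : String), Dom_countLower st → Spec_countLower st (countLower st)

-- ===== LEMMAS AND PROOFS =====

-- ===== VERDICT (by name: the statement is the Claim_ definition above) =====
theorem countLower_foldl (l : List Char) (c : Int) :
    l.foldl (fun count ch => if ch ≥ 'a' && ch ≤ 'z' then count + 1 else count) c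
      = c + countLowerGo l := by
  induction l generalizing c with
  | nil => simp [countLowerGo]
  | cons ch rest ih =>
    simp only [List.foldl, countLowerGo]
    rw [ih]
    split <;> ring

-- ===== VERDICT =====
theorem countLower_spec : Claim_equal_countLower := by
  intro st _
  unfold Spec_countLower countLower countLower_alt
  rw [countLower_foldl]
  ring
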